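-- pv_equiv track=rewrite | github.com/hafizhhasyhari/KEAMANAN-SISTEM-KOMPUTER-COMPUTER-SYSTEM-SECURITY-COLLEGE-2025 | Polyalphabetic Cipher/02_Kripografi_GUI_02.py | beaufort_cipher
-- ===== SOURCE A (Python) =====
-- def beaufort_cipher(text, key):
--     text = text.upper()
--     key = key.upper()
--     result = ""
--     key_index = 0
--     for char in text:
--         if char.isalpha():
--             t = ord(char) - 65
--             k = ord(key[key_index % len(key)]) - 65
--             c = (k - t + 26) % 26
--             result += chr(c + 65)
--             key_index += 1
--         else:
--             result += char
--     return result  # reversible, gunakan fungsi yang sama untuk dekripsi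
-- ===== SOURCE B (Python) =====
-- def beaufort_cipher(text, key):
--     text = text.upper()
--     key = key.upper()
--     letters = [c for c in text if c.isalpha()]
--     trans = [chr((ord(key[i % len(key)]) - ord(c) + 26) % 26 + 65)
--              for i, c in enumerate(letters)]
--     it = iter(trans)
--     return "".join(next(it) if c.isalpha() else c for c in text)
-- ===== Notes on version B (the rewrite author's own statement) =====
-- stated objective: alternative
-- what changed: A's single stateful loop (result string and key_index accumulated together) is replaced by two passes: filter out the letters, Beaufort-transform them keyed by their letter position via enumerate, then re-interleave the transformed stream with the non-letters of the original text.
import Mathlib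
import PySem

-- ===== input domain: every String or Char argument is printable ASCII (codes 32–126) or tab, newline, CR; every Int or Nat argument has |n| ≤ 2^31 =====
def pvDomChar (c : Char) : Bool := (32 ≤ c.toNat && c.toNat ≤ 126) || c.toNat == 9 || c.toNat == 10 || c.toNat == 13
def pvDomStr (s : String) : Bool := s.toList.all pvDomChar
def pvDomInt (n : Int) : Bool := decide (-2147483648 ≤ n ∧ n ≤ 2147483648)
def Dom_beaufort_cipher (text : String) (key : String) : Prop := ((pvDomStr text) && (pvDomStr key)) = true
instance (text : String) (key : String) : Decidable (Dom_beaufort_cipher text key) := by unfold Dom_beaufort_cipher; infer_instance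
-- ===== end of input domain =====

-- B splits A's single stateful loop into two passes: transform the alphabetic letters
-- (key indexed by letter position) and then reassemble along the original text; same
-- cost, different decomposition ('alternative'). Return value only; no mutation.

-- ===== PORT A =====
-- A's loop: one pass, state (result, key_index); key indexed with key_index % len(key).
-- getD 'A' is a totality guard only: under Pre_ the index is always in range.
def beaufortALoop (key : List Char) : List Char → List Char → Nat → List Char
  | [], result, _ => result
  | c :: rest, result, ki =>
    if PySem.Chars.isalpha c then
      let t : Int := (c.toNat : Int) - 65
      let k : Int := ((key.getD (ki % key.length) 'A').toNat : Int) - 65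
      let cc : Int := PySem.Int.mod (k - t + 26) 26
      beaufortALoop key rest (result ++ [Char.ofNat (cc.toNat + 65)]) (ki + 1)
    else
      beaufortALoop key rest (result ++ [c]) ki

def beaufort_cipher (text : String) (key : String) : String :=
  let t := PySem.Chars.upper text.toList
  let k := PySem.Chars.upper key.toList
  String.mk (beaufortALoop k t [] 0)

-- ===== PORT B =====
-- port of Source B's comprehension 'for i, c in enumerate(letters)' (counter i from 0);
-- getD 'A' is the same totality guard as in port A.
def beaufortBTrans (key : List Char) : Nat → List Char → List Char
  | _, [] => []
  | i, c :: rest =>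
    Char.ofNat ((PySem.Int.mod (((key.getD (i % key.length) 'A').toNat : Int)
        - (c.toNat : Int) + 26) 26).toNat + 65) :: beaufortBTrans key (i + 1) rest

-- ''.join(next(it) if c.isalpha() else c for c in text): consume the transformed stream
def beaufortBJoin : List Char → List Char → List Char
  | [], _ => []
  | c :: rest, ts =>
    if PySem.Chars.isalpha c then ts.headD c :: beaufortBJoin rest ts.tail
    else c :: beaufortBJoin rest ts

def beaufort_cipher_alt (text : String) (key : String) : String :=
  let t := PySem.Chars.upper text.toList
  let k := PySem.Chars.upper key.toList
  let letters := t.filter PySem.Chars.isalpha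
  String.mk (beaufortBJoin t (beaufortBTrans k 0 letters))

-- ===== PRECONDITION & SPEC =====
-- Pre_ excludes exactly the inputs where Python A raises ZeroDivisionError:
-- an empty key together with a text containing an alphabetic character.
def Pre_beaufort_cipher (text : String) (key : String) : Prop :=
  key.toList ≠ [] ∨ text.toList.all (fun c => !PySem.Chars.isalpha c) = true
instance (text : String) (key : String) : Decidable (Pre_beaufort_cipher text key) := by
  unfold Pre_beaufort_cipher; infer_instance

def pvWitness_beaufort_cipher : String × String := ("Hello, World!", "key")

def Spec_beaufort_cipher (text : String) (key : String) (out : String) : Prop := out = beaufort_cipher_alt text key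
instance (text : String) (key : String) (out : String) : Decidable (Spec_beaufort_cipher text key out) := by unfold Spec_beaufort_cipher; infer_instance

-- ===== CLAIM (what is proved, stated in full; the proofs are below) =====
def Claim_equal_beaufort_cipher : Prop := ∀ (text : String) (key : String), Dom_beaufort_cipher text key → Pre_beaufort_cipher text key → Spec_beaufort_cipher text key (beaufort_cipher text key)

-- ===== LEMMAS AND PROOFS =====

-- A's encrypted character equals B's: (k-65)-(t-65) = k-t.
lemma beaufort_char_eq (kc c : Char) :
    Char.ofNat ((PySem.Int.mod (((kc.toNat : Int) - 65) - ((c.toNat : Int) - 65) + 26) 26).toNat + 65)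
      = Char.ofNat ((PySem.Int.mod (((kc.toNat : Int)) - (c.toNat : Int) + 26) 26).toNat + 65) := by
  have : ((kc.toNat : Int) - 65) - ((c.toNat : Int) - 65) + 26 = (kc.toNat : Int) - (c.toNat : Int) + 26 := by ring
  rw [this]

-- Main invariant: A's loop from state (acc, j) is acc followed by B's reassembly of the
-- remaining text with the transformed stream started at letter position j.
lemma beaufort_main (key : List Char) : ∀ (cs : List Char) (j : Nat) (acc : List Char),
    beaufortALoop key cs acc j
      = acc ++ beaufortBJoin cs (beaufortBTrans key j (cs.filter PySem.Chars.isalpha)) := by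
  intro cs
  induction cs with
  | nil => intro j acc; simp [beaufortALoop, beaufortBJoin]
  | cons c rest ih =>
    intro j acc
    by_cases h : PySem.Chars.isalpha c = true
    · simp only [beaufortALoop, beaufortBJoin, List.filter_cons_of_pos h, h, if_pos,
        beaufortBTrans, List.headD_cons, List.tail_cons]
      rw [ih, beaufort_char_eq]
      simp
    · rw [List.filter_cons_of_neg (by simpa using h)]
      simp only [beaufortALoop, beaufortBJoin, h, if_neg h, Bool.false_eq_true, ite_false]
      rw [ih]
      simp

-- ===== VERDICT (by name: the statement is the Claim_ definition above) =====
theorem beaufort_cipher_spec : Claim_equal_beaufort_cipher := by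
  intro text key _ _
  unfold Spec_beaufort_cipher beaufort_cipher beaufort_cipher_alt
  show String.mk (beaufortALoop (PySem.Chars.upper key.toList) (PySem.Chars.upper text.toList) [] 0)
      = String.mk (beaufortBJoin (PySem.Chars.upper text.toList)
          (beaufortBTrans (PySem.Chars.upper key.toList) 0
            ((PySem.Chars.upper text.toList).filter PySem.Chars.isalpha)))
  rw [beaufort_main]
  simp
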